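-- pv_equiv track=rewrite | github.com/WongQiyu/Leetcode-Practices | ZOnline Assesment/grvt2.py | solution
-- ===== SOURCE A (Python) =====
-- def solution (N, S):
--     stack = []
--     pointer = -1
--     stack_count = -1
--     #min pointer is -1
--     for item in S:
--         if item == 'back':
--             if pointer == -1:
--                 pointer = 0
--             pointer -= 1
--         elif item == 'forward':
--             pointer += 1
--             if stack_count < pointer:
--                 pointer = stack_count
--         else:
--             if pointer < stack_count:
--                 stack = stack[:pointer+1]
--
--             stack.append(item)
--             pointer += 1
--             stack_count = len(stack) - 1
--     if len(stack) == 0: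
--         return '/home'
--     return '/home/' + "/".join(stack)
-- ===== SOURCE B (Python) =====
-- def solution(N, S):
--     back = []      # pages before/at the current one (top = current page)
--     fwd = []       # pages ahead of the current one (top = next page)
--     for item in S:
--         if item == 'back':
--             if back:
--                 fwd.append(back.pop())
--         elif item == 'forward':
--             if fwd:
--                 back.append(fwd.pop())
--         else:
--             fwd.clear()
--             back.append(item)
--     pages = back + fwd[::-1]
--     if not pages:
--         return '/home'
--     return '/home/' + '/'.join(pages)
-- ===== Notes on version B (the rewrite author's own statement) =====
-- stated objective: idiomatic
-- what changed: Replaces the pointer-into-a-truncated-list simulation with the classic two-stack back/forward history (pop between stacks, clear forward on visit), then joins back + reversed forward.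
import Mathlib
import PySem

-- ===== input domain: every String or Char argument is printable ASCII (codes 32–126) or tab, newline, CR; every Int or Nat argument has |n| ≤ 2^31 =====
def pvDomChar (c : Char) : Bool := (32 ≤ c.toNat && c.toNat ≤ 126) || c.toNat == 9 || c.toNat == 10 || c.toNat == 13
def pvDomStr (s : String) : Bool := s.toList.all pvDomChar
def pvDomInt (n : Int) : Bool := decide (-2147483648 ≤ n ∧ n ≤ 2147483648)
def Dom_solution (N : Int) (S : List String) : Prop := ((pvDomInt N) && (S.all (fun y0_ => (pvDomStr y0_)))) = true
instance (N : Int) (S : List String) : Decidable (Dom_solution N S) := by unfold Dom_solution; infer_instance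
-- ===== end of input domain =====

-- B replaces A's pointer-into-a-truncated-list simulation by the classic two-stack
-- back/forward history; idiomatic, same result.

-- ===== PORT A =====
-- state = (stack, pointer, stack_count)
def stepA (st : List String × Int × Int) (item : String) : List String × Int × Int :=
  let (stack, pointer, stack_count) := st
  if item == "back" then
    let pointer := if pointer == -1 then (0 : Int) else pointer
    (stack, pointer - 1, stack_count)
  else if item == "forward" then
    let pointer := pointer + 1
    let pointer := if stack_count < pointer then stack_count else pointer
    (stack, pointer, stack_count)
  else
    let stack := if pointer < stack_count then PySem.List.slice stack none (some (pointer + 1)) else stack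
    let stack := stack ++ [item]
    (stack, pointer + 1, (stack.length : Int) - 1)

def solution (N : Int) (S : List String) : String :=
  let st := S.foldl stepA ([], -1, -1)
  if st.1.length == 0 then "/home"
  else "/home/" ++ PySem.Str.join "/" st.1

-- ===== PORT B =====
-- state = (back, fwd), both stacks with the top at the head (Lean's natural stack)
def stepB (st : List String × List String) (item : String) : List String × List String :=
  let (back, fwd) := st
  if item == "back" then
    match back with
    | [] => (back, fwd)
    | p :: rest => (rest, p :: fwd)
  else if item == "forward" then
    match fwd with
    | [] => (back, fwd)
    | p :: rest => (p :: back, rest)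
  else
    (item :: back, [])

def solution_alt (N : Int) (S : List String) : String :=
  let st := S.foldl stepB ([], [])
  let pages := st.1.reverse ++ st.2
  if pages.isEmpty then "/home"
  else "/home/" ++ PySem.Str.join "/" pages

-- ===== PRECONDITION & SPEC =====
def Spec_solution (N : Int) (S : List String) (out : String) : Prop := out = solution_alt N S
instance (N : Int) (S : List String) (out : String) : Decidable (Spec_solution N S out) := by unfold Spec_solution; infer_instance

-- ===== CLAIM (what is proved, stated in full; the proofs are below) =====
def Claim_equal_solution : Prop := ∀ (N : Int) (S : List String), Dom_solution N S → Spec_solution N S (solution N S)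

-- ===== LEMMAS AND PROOFS =====

-- Invariant: A's state is determined by B's two stacks.
theorem loop_inv (S : List String) : ∀ (back fwd : List String),
    S.foldl stepA (back.reverse ++ fwd, (back.length : Int) - 1,
      ((back.length : Int) + (fwd.length : Int)) - 1)
    = (let st := S.foldl stepB (back, fwd)
       (st.1.reverse ++ st.2, (st.1.length : Int) - 1,
        ((st.1.length : Int) + (st.2.length : Int)) - 1)) := by
  induction S with
  | nil => intro back fwd; simp
  | cons item rest ih =>
    intro back fwd
    simp only [List.foldl_cons]
    by_cases hb : item = "back"
    · subst hb
      cases back with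
      | nil =>
        have h1 : stepA (([] : List String).reverse ++ fwd, (([] : List String).length : Int) - 1,
            ((([] : List String).length : Int) + (fwd.length : Int)) - 1) "back"
            = (fwd, -1, (fwd.length : Int) - 1) := by
          simp [stepA]
        have h2 : stepB (([] : List String), fwd) "back" = ([], fwd) := by simp [stepB]
        rw [h1, h2]
        have := ih ([] : List String) fwd
        simpa using this
      | cons p back' =>
        have h1 : stepA ((p :: back').reverse ++ fwd, ((p :: back').length : Int) - 1,
            (((p :: back').length : Int) + (fwd.length : Int)) - 1) "back"
            = (back'.reverse ++ (p :: fwd), (back'.length : Int) - 1,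
               ((back'.length : Int) + ((p :: fwd).length : Int)) - 1) := by
          simp [stepA]
          omega
        have h2 : stepB ((p :: back'), fwd) "back" = (back', p :: fwd) := by simp [stepB]
        rw [h1, h2, ih]
    · by_cases hf : item = "forward"
      · subst hf
        cases fwd with
        | nil =>
          have h1 : stepA (back.reverse ++ ([] : List String), (back.length : Int) - 1,
              ((back.length : Int) + (([] : List String).length : Int)) - 1) "forward"
              = (back.reverse, (back.length : Int) - 1, (back.length : Int) - 1) := by
            simp [stepA]
          have h2 : stepB (back, ([] : List String)) "forward" = (back, []) := by
            simp [stepB]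
          rw [h1, h2]
          have := ih back ([] : List String)
          simpa using this
        | cons q fwd' =>
          have h1 : stepA (back.reverse ++ (q :: fwd'), (back.length : Int) - 1,
              ((back.length : Int) + ((q :: fwd').length : Int)) - 1) "forward"
              = ((q :: back).reverse ++ fwd', ((q :: back).length : Int) - 1,
                 (((q :: back).length : Int) + ((fwd'.length : Int))) - 1) := by
            simp [stepA]
            omega
          have h2 : stepB (back, q :: fwd') "forward" = (q :: back, fwd') := by
            simp [stepB]
          rw [h1, h2, ih]
      · -- visit
        have h2 : stepB (back, fwd) item = (item :: back, []) := by
          simp [stepB, hb, hf]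
        have h1 : stepA (back.reverse ++ fwd, (back.length : Int) - 1,
            ((back.length : Int) + (fwd.length : Int)) - 1) item
            = ((item :: back).reverse ++ ([] : List String), ((item :: back).length : Int) - 1,
               (((item :: back).length : Int) + ((0 : Nat) : Int)) - 1) := by
          simp only [stepA, beq_iff_eq, hb, hf, if_false]
          have htrunc :
              (if ((back.length : Int) - 1) < ((back.length : Int) + (fwd.length : Int)) - 1
                then PySem.List.slice (back.reverse ++ fwd) none (some (((back.length : Int) - 1) + 1))
                else back.reverse ++ fwd) = back.reverse := by
            cases fwd with
            | nil => simp
            | cons q fwd' =>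
              rw [if_pos (by simp)]
              have : ((back.length : Int) - 1) + 1 = ((back.length : Nat) : Int) := by ring
              rw [this, PySem.List.slice_to_natCast]
              simp
          simp only [htrunc]
          simp
        rw [h1, h2]
        simpa using ih (item :: back) []

-- ===== VERDICT (by name: the statement is the Claim_ definition above) =====
theorem solution_spec : Claim_equal_solution := by
  intro N S _
  unfold Spec_solution solution solution_alt
  have := loop_inv S [] []
  simp only [List.reverse_nil, List.nil_append, List.length_nil, Nat.cast_zero] at this
  norm_num at this
  rw [this]
  simp [List.isEmpty_iff, List.length_eq_zero_iff]
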